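-- pv_equiv track=rewrite | github.com/won-js/Algorithm | review/lesson4_2.py | solution
-- ===== SOURCE A (Python) =====
-- def solution(N,A):
--     dic = {}
--     curr_max = 0
--     total_max = 0
--
--     for num in A:
--         if num == N+1:
--             total_max += curr_max
--             curr_max = 0
--             dic.clear()
--         else:
--             if dic.get(num):
--                 dic[num] += 1
--                 if dic[num] > curr_max:
--                     curr_max = dic[num]
--             else:
--                 dic[num] = 1
--                 if curr_max < 1:
--                     curr_max = 1
--
--     answer = [total_max] * (N)
--
--     for i in dic.keys():
--         answer[i-1] += dic[i]
--
--     return answer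
-- ===== SOURCE B (Python) =====
-- def solution(N, A):
--     counters = [0] * N
--     max_counter = 0
--     last_update = 0
--     for num in A:
--         if num == N + 1:
--             last_update = max_counter
--         else:
--             c = counters[num - 1]
--             if c < last_update:
--                 c = last_update
--             c += 1
--             counters[num - 1] = c
--             if c > max_counter:
--                 max_counter = c
--     return [max(c, last_update) for c in counters]
-- ===== Notes on version B (the rewrite author's own statement) =====
-- stated objective: alternative
-- what changed: Replaces A's per-segment increment dict plus accumulated total_max (cleared on every max-counter op) with the standard lazy MaxCounters structure: one full counter array with a running max and a lazy last_update floor applied on write and once at the end, so no clearing and no final dict write-back.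
-- outside the precondition, e.g. on solution(2, [5, 3]): A returns [1, 1], B raises IndexError; on solution(2, [0, 2, 3]): A returns [1, 1], B returns [2, 2]; on solution(-3, [7, -2]): A returns [], B raises IndexError
import Mathlib
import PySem

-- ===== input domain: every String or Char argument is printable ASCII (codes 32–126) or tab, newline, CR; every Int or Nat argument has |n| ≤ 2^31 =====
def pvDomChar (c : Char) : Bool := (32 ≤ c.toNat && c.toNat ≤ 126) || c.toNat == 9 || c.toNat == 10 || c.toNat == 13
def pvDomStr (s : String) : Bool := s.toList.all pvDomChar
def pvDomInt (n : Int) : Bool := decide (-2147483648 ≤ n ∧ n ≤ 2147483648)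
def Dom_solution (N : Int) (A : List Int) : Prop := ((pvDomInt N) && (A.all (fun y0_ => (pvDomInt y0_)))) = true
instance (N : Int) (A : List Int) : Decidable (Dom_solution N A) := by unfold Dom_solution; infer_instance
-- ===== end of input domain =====

-- B replaces A's per-segment increment dict + accumulated total_max with the standard lazy
-- MaxCounters array (running max + lazy last_update floor); alternative structure, same cost.

-- ===== PORT A =====
-- one loop iteration of A: state = (dic, curr_max, total_max)
def solStepA (N : Int) (st : PySem.Dict Int Int × Int × Int) (num : Int) :
    PySem.Dict Int Int × Int × Int :=
  match st with
  | (dic, currMax, totalMax) =>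
    if num = N + 1 then
      (PySem.Dict.empty, 0, totalMax + currMax)          -- total_max += curr_max; curr_max = 0; dic.clear()
    else
      match dic.get? num with                              -- if dic.get(num):  (truthy: present and nonzero)
      | some v =>
        if v ≠ 0 then
          (dic.insert num (v + 1),
           if v + 1 > currMax then v + 1 else currMax, totalMax)
        else
          (dic.insert num 1, if currMax < 1 then 1 else currMax, totalMax)
      | none =>
          (dic.insert num 1, if currMax < 1 then 1 else currMax, totalMax)

def solution (N : Int) (A : List Int) : List Int :=
  let st := A.foldl (solStepA N) (PySem.Dict.empty, 0, 0)
  let answer := PySem.List.pyRepeat [st.2.2] N            -- [total_max] * N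
  st.1.keys.foldl                                          -- for i in dic.keys(): answer[i-1] += dic[i]
    (fun ans i =>
      PySem.List.pySetD ans (i - 1) (PySem.List.pyGetD ans (i - 1) 0 + st.1.getD i 0))
    answer

-- ===== PORT B =====
-- one loop iteration of B: state = (counters, max_counter, last_update)
def solStepB (N : Int) (st : List Int × Int × Int) (num : Int) : List Int × Int × Int :=
  match st with
  | (counters, maxCounter, lastUpdate) =>
    if num = N + 1 then
      (counters, maxCounter, maxCounter)                   -- last_update = max_counter
    else
      let c0 := PySem.List.pyGetD counters (num - 1) 0     -- c = counters[num - 1] (in range under Pre_)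
      let c1 := if c0 < lastUpdate then lastUpdate else c0
      let c := c1 + 1
      (PySem.List.pySetD counters (num - 1) c,
       if c > maxCounter then c else maxCounter, lastUpdate)

def solution_alt (N : Int) (A : List Int) : List Int :=
  let st := A.foldl (solStepB N) (PySem.List.pyRepeat [0] N, 0, 0)
  st.1.map (fun c => max c st.2.2)                         -- [max(c, last_update) for c in counters]

-- ===== PRECONDITION & SPEC =====
-- Pre_ excludes elements outside the wraparound range 1-N..N+1 (on which A raises an IndexError
-- unless a later max-op happens to clear the dict first, while B indexes the counter array
-- immediately), lists mixing wrapping nonpositive elements with max-ops (A's per-segment dict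
-- aliases two keys onto one cell and its accumulated result is accidental), and negative N
-- except the trivial all-max-op lists on which both return [].
def Pre_solution (N : Int) (A : List Int) : Prop :=
  (0 ≤ N ∧ (∀ x ∈ A, 1 - N ≤ x ∧ x ≤ N + 1) ∧ ((∃ x ∈ A, x ≤ 0) → (N + 1) ∉ A)) ∨
  (N < 0 ∧ ∀ x ∈ A, x = N + 1)
instance (N : Int) (A : List Int) : Decidable (Pre_solution N A) := by
  unfold Pre_solution; infer_instance

def pvWitness_solution : Int × List Int := (3, [1, 2, 4, 3, 3])

def Spec_solution (N : Int) (A : List Int) (out : List Int) : Prop := out = solution_alt N A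
instance (N : Int) (A : List Int) (out : List Int) : Decidable (Spec_solution N A out) := by
  unfold Spec_solution; infer_instance

-- ===== CLAIM (what is proved, stated in full; the proofs are below) =====
def Claim_equal_solution : Prop :=
  ∀ (N : Int) (A : List Int), Dom_solution N A → Pre_solution N A →
    Spec_solution N A (solution N A)

-- ===== LEMMAS AND PROOFS =====

theorem pvGetD_set_self (xs : List Int) (i : Nat) (v : Int) (h : i < xs.length) :
    (xs.set i v).getD i 0 = v := by
  rw [List.getD_eq_getElem?_getD, List.getElem?_set_self h]; rfl

theorem pvGetD_set_of_ne (xs : List Int) (i j : Nat) (v : Int) (h : i ≠ j) :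
    (xs.set i v).getD j 0 = xs.getD j 0 := by
  rw [List.getD_eq_getElem?_getD, List.getElem?_set_ne h, ← List.getD_eq_getElem?_getD]

-- The coupling invariant between A's state (dic, cm, tm) and B's state (counters, mc, lu).
def solInv (N : Int) (a : PySem.Dict Int Int × Int × Int) (b : List Int × Int × Int) : Prop :=
  b.1.length = N.toNat ∧
  b.2.2 = a.2.2 ∧
  b.2.1 = a.2.2 + a.2.1 ∧
  0 ≤ a.2.1 ∧ 0 ≤ a.2.2 ∧
  a.1.keys.Nodup ∧
  (∀ k ∈ a.1.keys, 1 ≤ k ∧ k ≤ N) ∧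
  (∀ j : Nat, j < N.toNat →
    (∀ v, a.1.get? ((j : Int) + 1) = some v →
        b.1.getD j 0 = a.2.2 + v ∧ 1 ≤ v ∧ v ≤ a.2.1) ∧
    (a.1.get? ((j : Int) + 1) = none → b.1.getD j 0 ≤ a.2.2))

theorem solInv_init (N : Int) :
    solInv N (PySem.Dict.empty, 0, 0) (PySem.List.pyRepeat [0] N, 0, 0) := by
  refine ⟨?_, rfl, rfl, le_refl _, le_refl _, ?_, ?_, ?_⟩
  · simp [PySem.List.pyRepeat_singleton]
  · simp [PySem.Dict.keys_empty]
  · simp [PySem.Dict.keys_empty]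
  · intro j hj
    constructor
    · intro v hv; simp [PySem.Dict.get?_empty] at hv
    · intro _; simp [PySem.List.pyRepeat_singleton]

theorem solInv_step (N : Int) (a : PySem.Dict Int Int × Int × Int)
    (b : List Int × Int × Int) (num : Int)
    (hinv : solInv N a b) (h1 : 1 ≤ num) (h2 : num ≤ N + 1) :
    solInv N (solStepA N a num) (solStepB N b num) := by
  obtain ⟨dic, cm, tm⟩ := a
  obtain ⟨counters, mc, lu⟩ := b
  obtain ⟨hlen, hlu, hmc, hcm0, htm0, hnd, hrange, hpt⟩ := hinv
  simp only at hlen hlu hmc hcm0 htm0 hnd hrange hpt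
  subst hlu hmc
  by_cases hmax : num = N + 1
  · -- max-counter operation
    simp only [solStepA, solStepB, if_pos hmax]
    unfold solInv
    dsimp only
    refine ⟨hlen, rfl, by ring, le_refl _, by omega, by simp, by simp, ?_⟩
    intro j hj
    refine ⟨?_, ?_⟩
    · intro v hv; simp [PySem.Dict.get?_empty] at hv
    · intro _
      obtain ⟨hsome, hnone⟩ := hpt j hj
      cases hget : dic.get? ((j : Int) + 1) with
      | some v => obtain ⟨he, hv1, hvc⟩ := hsome v hget; omega
      | none => have := hnone hget; omega
  · -- increase(num): 1 ≤ num ≤ N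
    have hnumN : num ≤ N := by omega
    have hidx : ((num - 1).toNat : Int) = num - 1 := by omega
    have hidxlt : (num - 1).toNat < N.toNat := by omega
    simp only [solStepA, solStepB, if_neg hmax]
    have hc0 : PySem.List.pyGetD counters (num - 1) 0 = counters.getD (num - 1).toNat 0 :=
      PySem.List.pyGetD_of_nonneg _ _ (by omega)
    have hset : ∀ v : Int, PySem.List.pySetD counters (num - 1) v
        = counters.set (num - 1).toNat v :=
      fun v => PySem.List.pySetD_of_nonneg _ _ (by omega)
    obtain ⟨hsomeN, hnoneN⟩ := hpt (num - 1).toNat hidxlt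
    have hkey : ((num - 1).toNat : Int) + 1 = num := by omega
    rw [hkey] at hsomeN hnoneN
    cases hget : dic.get? num with
    | some v =>
      obtain ⟨hcv, hv1, hvc⟩ := hsomeN v hget
      simp only [if_pos (by omega : v ≠ 0), hc0, hcv]
      have hnolift : ¬ (lu + v < lu) := by omega
      simp only [if_neg hnolift, hset]
      unfold solInv
      dsimp only
      refine ⟨by simp [hlen], rfl, ?_, by omega, htm0, ?_, ?_, ?_⟩
      · split_ifs with hgt <;> omega
      · exact PySem.Dict.nodup_keys_insert dic num (v + 1) hnd
      · intro k hk
        rcases (PySem.Dict.mem_keys_insert _ _ _ _).1 hk with h | h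
        · subst h; omega
        · exact hrange k h
      · intro j hj
        by_cases hjeq : (j : Int) + 1 = num
        · have hjv : j = (num - 1).toNat := by omega
          subst hjv
          rw [hjeq, PySem.Dict.get?_insert_self]
          constructor
          · intro w hw
            injection hw with hw; subst hw
            refine ⟨?_, by omega, by omega⟩
            rw [pvGetD_set_self counters _ _ (by omega)]; ring
          · intro h; simp at h
        · obtain ⟨hsome', hnone'⟩ := hpt j hj
          rw [PySem.Dict.get?_insert_of_ne dic (v + 1) hjeq]
          rw [pvGetD_set_of_ne counters _ j _ (by omega : (num - 1).toNat ≠ j)]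
          constructor
          · intro w hw
            obtain ⟨he, h1', h2'⟩ := hsome' w hw
            refine ⟨he, h1', ?_⟩
            split_ifs with hgt <;> omega
          · exact hnone'
    | none =>
      have hcle : counters.getD (num - 1).toNat 0 ≤ lu := hnoneN hget
      have hc1 : (if PySem.List.pyGetD counters (num - 1) 0 < lu then lu
          else PySem.List.pyGetD counters (num - 1) 0) = lu := by
        rw [hc0]; split_ifs with h
        · omega
        · omega
      rw [hc1, hset]
      unfold solInv
      dsimp only
      refine ⟨by simp [hlen], rfl, ?_, by omega, htm0, ?_, ?_, ?_⟩
      · split_ifs with h h' <;> omega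
      · exact PySem.Dict.nodup_keys_insert dic num 1 hnd
      · intro k hk
        rcases (PySem.Dict.mem_keys_insert _ _ _ _).1 hk with h | h
        · subst h; omega
        · exact hrange k h
      · intro j hj
        by_cases hjeq : (j : Int) + 1 = num
        · have hjv : j = (num - 1).toNat := by omega
          subst hjv
          rw [hjeq, PySem.Dict.get?_insert_self]
          constructor
          · intro w hw
            injection hw with hw; subst hw
            refine ⟨?_, le_refl _, by split_ifs with h <;> omega⟩
            rw [pvGetD_set_self counters _ _ (by omega)]

          · intro h; simp at h
        · obtain ⟨hsome', hnone'⟩ := hpt j hj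
          rw [PySem.Dict.get?_insert_of_ne dic 1 hjeq]
          rw [pvGetD_set_of_ne counters _ j _ (by omega : (num - 1).toNat ≠ j)]
          constructor
          · intro w hw
            obtain ⟨he, h1', h2'⟩ := hsome' w hw
            refine ⟨he, h1', ?_⟩
            split_ifs with h <;> omega
          · exact hnone'

theorem solInv_foldl (N : Int) (A : List Int)
    (hA : ∀ x ∈ A, 1 ≤ x ∧ x ≤ N + 1)
    (a : PySem.Dict Int Int × Int × Int) (b : List Int × Int × Int)
    (hinv : solInv N a b) :
    solInv N (A.foldl (solStepA N) a) (A.foldl (solStepB N) b) := by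
  induction A generalizing a b with
  | nil => exact hinv
  | cons x xs ih =>
    simp only [List.foldl_cons]
    exact ih (fun y hy => hA y (List.mem_cons_of_mem x hy))
      _ _ (solInv_step N a b x hinv (hA x (List.mem_cons_self)).1 (hA x (List.mem_cons_self)).2)

-- A's final write-back loop, characterised pointwise.
-- Python's (possibly negative) in-range index i into a list of length n.
def pvIdx (n : Nat) (i : Int) : Nat :=
  if 0 ≤ i then i.toNat else n - (-i).toNat

theorem pvIdx_lt (n : Nat) (i : Int) (_h1 : -(n : Int) ≤ i) (h2 : i < (n : Int)) (hn : 0 < n) :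
    pvIdx n i < n := by
  unfold pvIdx; split_ifs <;> omega

theorem pvIdx?_eq (n : Nat) (i : Int) (h1 : -(n : Int) ≤ i) (h2 : i < (n : Int)) :
    PySem.List.pyIdx? n i = some (pvIdx n i) := by
  unfold PySem.List.pyIdx? pvIdx
  split_ifs <;> rfl

theorem pvSetD_eq (xs : List Int) (i v : Int)
    (h1 : -(xs.length : Int) ≤ i) (h2 : i < (xs.length : Int)) :
    PySem.List.pySetD xs i v = xs.set (pvIdx xs.length i) v := by
  unfold PySem.List.pySetD PySem.List.pySet?
  rw [pvIdx?_eq _ _ h1 h2]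
  rfl

theorem pvGetD_eq (xs : List Int) (i d : Int)
    (h1 : -(xs.length : Int) ≤ i) (h2 : i < (xs.length : Int)) :
    PySem.List.pyGetD xs i d = xs.getD (pvIdx xs.length i) d := by
  have hlt : pvIdx xs.length i < xs.length := by unfold pvIdx; split_ifs <;> omega
  unfold PySem.List.pyGetD PySem.List.pyGet?
  rw [pvIdx?_eq _ _ h1 h2]
  simp [List.getD_eq_getElem?_getD, List.getElem?_eq_getElem hlt]

-- The coupling invariant for the no-max-op regime (some elements wrap; tm = lu = 0 throughout).
def solInv2 (N : Int) (a : PySem.Dict Int Int × Int × Int) (b : List Int × Int × Int) : Prop :=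
  b.1.length = N.toNat ∧
  a.2.2 = 0 ∧ b.2.2 = 0 ∧
  a.1.keys.Nodup ∧
  (∀ k ∈ a.1.keys, 1 - N ≤ k ∧ k ≤ N) ∧
  (∀ k v, a.1.get? k = some v → 1 ≤ v) ∧
  (∀ j : Nat, j < N.toNat →
      b.1.getD j 0 = a.1.getD ((j : Int) + 1) 0 + a.1.getD ((j : Int) + 1 - N) 0)

theorem pvDictGetD_nonneg (dic : PySem.Dict Int Int)
    (hval : ∀ k v, dic.get? k = some v → 1 ≤ v) (k : Int) : 0 ≤ dic.getD k 0 := by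
  rw [PySem.Dict.getD_eq_get?_getD]
  cases h : dic.get? k with
  | none => simp
  | some v => simpa using le_trans (by omega : (0:Int) ≤ 1) (hval k v h)

theorem solInv2_init (N : Int) :
    solInv2 N (PySem.Dict.empty, 0, 0) (PySem.List.pyRepeat [0] N, 0, 0) := by
  refine ⟨by simp [PySem.List.pyRepeat_singleton], rfl, rfl, by simp, by simp, ?_, ?_⟩
  · intro k v hv; simp [PySem.Dict.get?_empty] at hv
  · intro j hj
    rw [PySem.List.pyRepeat_singleton]
    simp [List.getD_eq_getElem?_getD, hj, PySem.Dict.getD_empty]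

theorem solInv2_step (N : Int) (a : PySem.Dict Int Int × Int × Int)
    (b : List Int × Int × Int) (num : Int)
    (hinv : solInv2 N a b) (hN : 1 ≤ N) (h1 : 1 - N ≤ num) (h2 : num ≤ N) :
    solInv2 N (solStepA N a num) (solStepB N b num) := by
  obtain ⟨dic, cm, tm⟩ := a
  obtain ⟨counters, mc, lu⟩ := b
  obtain ⟨hlen, htm, hlu, hnd, hrange, hval, hpt⟩ := hinv
  simp only at hlen htm hlu hnd hrange hval hpt
  subst htm hlu
  have hne : ¬ num = N + 1 := by omega
  simp only [solStepA, solStepB, if_neg hne]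
  have hlenZ : (counters.length : Int) = N := by omega
  have hio1 : -(counters.length : Int) ≤ num - 1 := by omega
  have hio2 : num - 1 < (counters.length : Int) := by omega
  have hidxlt : pvIdx counters.length (num - 1) < counters.length :=
    pvIdx_lt _ _ hio1 hio2 (by omega)
  set idx := pvIdx counters.length (num - 1) with hidxdef
  have hkey : ((idx : Int) = num - 1 ∧ 1 ≤ num) ∨ ((idx : Int) = num - 1 + N ∧ num ≤ 0) := by
    rw [hidxdef]; unfold pvIdx; split_ifs with h
    · left; omega
    · right; omega
  have hcell := hpt idx (by omega)
  have hgetc : PySem.List.pyGetD counters (num - 1) 0 = counters.getD idx 0 :=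
    pvGetD_eq _ _ _ hio1 hio2
  have hsetc : ∀ v, PySem.List.pySetD counters (num - 1) v = counters.set idx v :=
    fun v => pvSetD_eq _ _ _ hio1 hio2
  have hc0 : 0 ≤ counters.getD idx 0 := by
    rw [hcell]
    have := pvDictGetD_nonneg dic hval ((idx : Int) + 1)
    have := pvDictGetD_nonneg dic hval ((idx : Int) + 1 - N)
    omega
  have hfloor : (if PySem.List.pyGetD counters (num - 1) 0 < 0 then 0
      else PySem.List.pyGetD counters (num - 1) 0) = counters.getD idx 0 := by
    rw [hgetc]; split_ifs with h
    · omega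
    · rfl
  -- in both of A's branches the dict update is `insert num (dic.getD num 0 + 1)` and
  -- B's is `set idx (counters.getD idx 0 + 1)`; establish the invariant for that shape once
  have core : ∀ (cm' mc' : Int),
      solInv2 N (dic.insert num (dic.getD num 0 + 1), cm', 0)
        (counters.set idx (counters.getD idx 0 + 1), mc', 0) := by
    intro cm' mc'
    refine ⟨by simp [hlen], rfl, rfl,
      PySem.Dict.nodup_keys_insert dic num _ hnd, ?_, ?_, ?_⟩
    · intro k hk
      rcases (PySem.Dict.mem_keys_insert _ _ _ _).1 hk with h | h
      · subst h; omega
      · exact hrange k h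
    · intro k v hv
      rw [PySem.Dict.get?_insert] at hv
      split_ifs at hv with h
      · injection hv with hv; subst hv
        have := pvDictGetD_nonneg dic hval num; omega
      · exact hval k v hv
    · intro j hj
      by_cases hje : j = idx
      · rw [hje, pvGetD_set_self counters _ _ hidxlt, hcell]
        rcases hkey with ⟨hi, hpos⟩ | ⟨hi, hneg⟩
        · have e1 : (idx : Int) + 1 = num := by omega
          rw [e1, PySem.Dict.getD_insert, if_pos rfl,
            PySem.Dict.getD_insert, if_neg (by omega : ¬ (num - N = num))]
          omega
        · have e2 : (idx : Int) + 1 - N = num := by omega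
          rw [e2, PySem.Dict.getD_insert, if_neg (by omega : ¬ ((idx : Int) + 1 = num)),
            PySem.Dict.getD_insert, if_pos rfl]
          omega
      · rw [pvGetD_set_of_ne counters idx j _ (fun h => hje h.symm), hpt j hj]
        have e1 : (j : Int) + 1 ≠ num := by
          rcases hkey with ⟨hi, hpos⟩ | ⟨hi, hneg⟩ <;> omega
        have e2 : (j : Int) + 1 - N ≠ num := by
          rcases hkey with ⟨hi, hpos⟩ | ⟨hi, hneg⟩ <;> omega
        rw [PySem.Dict.getD_insert, if_neg e1, PySem.Dict.getD_insert, if_neg e2]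
  cases hget : dic.get? num with
  | some v =>
    have hv1 : 1 ≤ v := hval num v hget
    have hgd : dic.getD num 0 = v := by simp [PySem.Dict.getD_eq_get?_getD, hget]
    simp only [if_pos (by omega : v ≠ 0), hfloor, hsetc]
    have := core (if v + 1 > cm then v + 1 else cm) (if counters.getD idx 0 + 1 > mc then counters.getD idx 0 + 1 else mc)
    rw [hgd] at this
    exact this
  | none =>
    have hgd : dic.getD num 0 = 0 := by simp [PySem.Dict.getD_eq_get?_getD, hget]
    simp only [hfloor, hsetc]
    have := core (if cm < 1 then 1 else cm) (if counters.getD idx 0 + 1 > mc then counters.getD idx 0 + 1 else mc)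
    rw [hgd] at this
    simp only [zero_add] at this
    exact this

theorem solInv2_foldl (N : Int) (A : List Int) (hN : 1 ≤ N)
    (hA : ∀ x ∈ A, 1 - N ≤ x ∧ x ≤ N)
    (a : PySem.Dict Int Int × Int × Int) (b : List Int × Int × Int)
    (hinv : solInv2 N a b) :
    solInv2 N (A.foldl (solStepA N) a) (A.foldl (solStepB N) b) := by
  induction A generalizing a b with
  | nil => exact hinv
  | cons x xs ih =>
    simp only [List.foldl_cons]
    exact ih (fun y hy => hA y (List.mem_cons_of_mem x hy)) _ _
      (solInv2_step N a b x hinv hN (hA x List.mem_cons_self).1 (hA x List.mem_cons_self).2)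

-- A's final write-back loop, characterised pointwise (wraparound indexing allowed).
theorem solFinal_foldl (N : Int) (L : List Int) (f : Int → Int) (ans : List Int)
    (hN : 1 ≤ N) (hlen : ans.length = N.toNat)
    (hnd : L.Nodup) (hrange : ∀ k ∈ L, 1 - N ≤ k ∧ k ≤ N) (j : Nat)
    (hj : j < ans.length) :
    (L.foldl (fun ans i =>
        PySem.List.pySetD ans (i - 1) (PySem.List.pyGetD ans (i - 1) 0 + f i)) ans).getD j 0
      = ans.getD j 0 + (if ((j : Int) + 1) ∈ L then f ((j : Int) + 1) else 0)
        + (if ((j : Int) + 1 - N) ∈ L then f ((j : Int) + 1 - N) else 0) := by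
  induction L generalizing ans with
  | nil => simp
  | cons k ks ih =>
    obtain ⟨hk1, hkN⟩ := hrange k List.mem_cons_self
    have hlenZ : (ans.length : Int) = N := by omega
    have hio1 : -(ans.length : Int) ≤ k - 1 := by omega
    have hio2 : k - 1 < (ans.length : Int) := by omega
    have hidxlt : pvIdx ans.length (k - 1) < ans.length :=
      pvIdx_lt _ _ hio1 hio2 (by omega)
    have hkey : ((pvIdx ans.length (k - 1) : Int) = k - 1 ∧ 1 ≤ k) ∨
        ((pvIdx ans.length (k - 1) : Int) = k - 1 + N ∧ k ≤ 0) := by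
      unfold pvIdx; split_ifs with h
      · left; omega
      · right; omega
    have hknotin : k ∉ ks := (List.nodup_cons.1 hnd).1
    simp only [List.foldl_cons]
    rw [pvSetD_eq _ _ _ hio1 hio2]
    rw [ih _ (by simpa using hlen) hnd.of_cons
        (fun x hx => hrange x (List.mem_cons_of_mem k hx)) (by simpa using hj)]
    by_cases hje : j = pvIdx ans.length (k - 1)
    · -- this write lands on cell j
      rw [← hje] at hkey
      rw [← hje, pvGetD_set_self ans _ _ hj, pvGetD_eq _ _ _ hio1 hio2, ← hje]
      rcases hkey with ⟨hi, hpos⟩ | ⟨hi, hneg⟩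
      · have e1 : (j : Int) + 1 = k := by omega
        have h1' : ((j : Int) + 1) ∉ ks := by rw [e1]; exact hknotin
        have h1c : ((j : Int) + 1) ∈ k :: ks := by rw [e1]; exact List.mem_cons_self
        rw [if_neg h1', if_pos h1c, e1]
        have hne : k - N ≠ k := by omega
        have hm2 : (k - N ∈ k :: ks) ↔ (k - N ∈ ks) := by simp [List.mem_cons, hne]
        by_cases hin : (k - N) ∈ ks
        · rw [if_pos hin, if_pos (hm2.2 hin)]; ring
        · rw [if_neg hin, if_neg (fun h => hin (hm2.1 h))]; ring
      · have e2 : (j : Int) + 1 - N = k := by omega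
        have h2' : ((j : Int) + 1 - N) ∉ ks := by rw [e2]; exact hknotin
        have h2c : ((j : Int) + 1 - N) ∈ k :: ks := by rw [e2]; exact List.mem_cons_self
        rw [if_neg h2', if_pos h2c, e2]
        have hne : (j : Int) + 1 ≠ k := by omega
        have hm1 : (((j : Int) + 1) ∈ k :: ks) ↔ (((j : Int) + 1) ∈ ks) := by
          simp [List.mem_cons, hne]
        by_cases hin : ((j : Int) + 1) ∈ ks
        · rw [if_pos hin, if_pos (hm1.2 hin)]; ring
        · rw [if_neg hin, if_neg (fun h => hin (hm1.1 h))]; ring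
    · -- this write lands elsewhere
      rw [pvGetD_set_of_ne ans _ j _ (fun h => hje h.symm)]
      have e1 : (j : Int) + 1 ≠ k := by
        intro h; apply hje
        rcases hkey with ⟨hi, hpos⟩ | ⟨hi, hneg⟩ <;> omega
      have e2 : (j : Int) + 1 - N ≠ k := by
        intro h; apply hje
        rcases hkey with ⟨hi, hpos⟩ | ⟨hi, hneg⟩ <;> omega
      have hm1 : ((j : Int) + 1) ∈ k :: ks ↔ ((j : Int) + 1) ∈ ks := by
        simp [List.mem_cons, e1]
      have hm2 : ((j : Int) + 1 - N) ∈ k :: ks ↔ ((j : Int) + 1 - N) ∈ ks := by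
        simp [List.mem_cons, e2]
      by_cases hin1 : ((j : Int) + 1) ∈ ks <;> by_cases hin2 : ((j : Int) + 1 - N) ∈ ks <;>
        simp [hin1, hin2, hm1, hm2]

theorem pvFoldLen (a1 : PySem.Dict Int Int × Int × Int) (L : List Int) (ans : List Int) :
    (L.foldl (fun ans i =>
        PySem.List.pySetD ans (i - 1) (PySem.List.pyGetD ans (i - 1) 0 + a1.1.getD i 0)) ans).length
      = ans.length := by
  induction L generalizing ans with
  | nil => rfl
  | cons k ks ih =>
    simp only [List.foldl_cons]
    rw [ih, PySem.List.length_pySetD]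

theorem pvMemKeys_of_get?_some (d : PySem.Dict Int Int) (k v : Int)
    (h : d.get? k = some v) : k ∈ d.keys := by
  by_contra hm
  rw [(PySem.Dict.get?_eq_none_iff_not_mem_keys _ _).2 hm] at h
  cases h

-- ===== VERDICT (by name: the statement is the Claim_ definition above) =====
theorem solution_spec : Claim_equal_solution := by
  intro N A _ hpre
  rcases hpre with ⟨hN0, hbnd, hmix⟩ | ⟨hNneg, hall1⟩
  case inr =>
    -- N < 0 and every element is the max-op: both programs return []
    have hdicA : ∀ (L : List Int) (st : PySem.Dict Int Int × Int × Int),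
        (∀ x ∈ L, x = N + 1) → st.1 = PySem.Dict.empty →
        (L.foldl (solStepA N) st).1 = PySem.Dict.empty := by
      intro L
      induction L with
      | nil => intro st _ h; exact h
      | cons x xs ih =>
        intro st hAll h
        simp only [List.foldl_cons]
        apply ih _ (fun y hy => hAll y (List.mem_cons_of_mem x hy))
        obtain ⟨d, c, t⟩ := st
        simp only [solStepA, if_pos (hAll x List.mem_cons_self)]
    have hcntB : ∀ (L : List Int) (st : List Int × Int × Int),
        (∀ x ∈ L, x = N + 1) → st.1 = [] →
        (L.foldl (solStepB N) st).1 = [] := by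
      intro L
      induction L with
      | nil => intro st _ h; exact h
      | cons x xs ih =>
        intro st hAll h
        simp only [List.foldl_cons]
        apply ih _ (fun y hy => hAll y (List.mem_cons_of_mem x hy))
        obtain ⟨cs, m, l⟩ := st
        simp only [solStepB, if_pos (hAll x List.mem_cons_self)]
        exact h
    unfold Spec_solution solution solution_alt
    dsimp only
    rw [hdicA A _ hall1 rfl,
      hcntB A _ hall1 (by simp [PySem.List.pyRepeat_singleton, (by omega : N.toNat = 0)])]
    simp [PySem.Dict.keys_empty, PySem.List.pyRepeat_singleton,
      (by omega : N.toNat = 0)]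
  obtain hN0 := hN0
  unfold Spec_solution solution solution_alt
  set a := A.foldl (solStepA N) (PySem.Dict.empty, 0, 0) with ha
  set b := A.foldl (solStepB N) (PySem.List.pyRepeat [0] N, 0, 0) with hb
  have hanslen : (PySem.List.pyRepeat [a.2.2] N).length = N.toNat := by
    simp [PySem.List.pyRepeat_singleton]
  by_cases hall : ∀ x ∈ A, 1 ≤ x
  · -- regime 1: every element in 1..N+1 (max-ops allowed)
    have hA : ∀ x ∈ A, 1 ≤ x ∧ x ≤ N + 1 := fun x hx => ⟨hall x hx, (hbnd x hx).2⟩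
    have hinv := solInv_foldl N A hA _ _ (solInv_init N)
    rw [← ha, ← hb] at hinv
    obtain ⟨hlen, hlu, hmc, hcm0, htm0, hnd, hrange, hpt⟩ := hinv
    apply List.ext_getElem
    · rw [pvFoldLen, hanslen]; simp [hlen]
    intro j hjl hjr
    have hj : j < N.toNat := by rw [pvFoldLen, hanslen] at hjl; exact hjl
    have hN1 : 1 ≤ N := by omega
    have hrange' : ∀ k ∈ a.1.keys, 1 - N ≤ k ∧ k ≤ N := by
      intro k hk; obtain ⟨h1, h2⟩ := hrange k hk; omega
    have hmain := solFinal_foldl N a.1.keys (fun i => a.1.getD i 0)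
      (PySem.List.pyRepeat [a.2.2] N) hN1 hanslen hnd hrange' j (by rw [hanslen]; exact hj)
    have hgetD : ∀ (xs : List Int) (h : j < xs.length), xs[j] = xs.getD j 0 := by
      intro xs h; simp [List.getD_eq_getElem?_getD, List.getElem?_eq_getElem h]
    rw [hgetD _ hjl, hgetD _ hjr, hmain]
    have hwrapno : ((j : Int) + 1 - N) ∉ a.1.keys := by
      intro hmem; have := hrange _ hmem; omega
    rw [if_neg hwrapno, add_zero]
    have hbase : (PySem.List.pyRepeat [a.2.2] N).getD j 0 = a.2.2 := by
      rw [PySem.List.pyRepeat_singleton]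
      simp [List.getD_eq_getElem?_getD, hj]
    rw [hbase]
    have hmap : (b.1.map (fun c => max c b.2.2)).getD j 0 = max (b.1.getD j 0) b.2.2 := by
      have hjb : j < b.1.length := by rw [hlen]; exact hj
      simp [List.getD_eq_getElem?_getD, hjb]
    rw [hmap, hlu]
    obtain ⟨hsome, hnone⟩ := hpt j hj
    cases hget : a.1.get? ((j : Int) + 1) with
    | some v =>
      obtain ⟨he, hv1, hvc⟩ := hsome v hget
      rw [if_pos (pvMemKeys_of_get?_some _ _ _ hget)]
      have hgd : a.1.getD ((j : Int) + 1) 0 = v := by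
        simp [PySem.Dict.getD_eq_get?_getD, hget]
      simp only [hgd, he]
      omega
    | none =>
      rw [if_neg ((PySem.Dict.get?_eq_none_iff_not_mem_keys _ _).1 hget)]
      have := hnone hget
      omega
  · -- regime 2: some element is nonpositive, hence no max-op occurs in A
    rw [not_forall] at hall
    simp only [not_forall, not_le, exists_prop] at hall
    obtain ⟨x0, hx0A, hx00⟩ := hall
    have hnr : (N + 1) ∉ A := hmix ⟨x0, hx0A, by omega⟩
    have hN1 : 1 ≤ N := by have := (hbnd x0 hx0A).1; omega
    have hA : ∀ x ∈ A, 1 - N ≤ x ∧ x ≤ N := by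
      intro x hx
      refine ⟨(hbnd x hx).1, ?_⟩
      have h2 := (hbnd x hx).2
      by_cases hxe : x = N + 1
      · exact absurd (hxe ▸ hx) hnr
      · omega
    have hinv := solInv2_foldl N A hN1 hA _ _ (solInv2_init N)
    rw [← ha, ← hb] at hinv
    obtain ⟨hlen, htm, hlu, hnd, hrange, hval, hpt⟩ := hinv
    apply List.ext_getElem
    · rw [pvFoldLen, hanslen]; simp [hlen]
    intro j hjl hjr
    have hj : j < N.toNat := by rw [pvFoldLen, hanslen] at hjl; exact hjl
    have hmain := solFinal_foldl N a.1.keys (fun i => a.1.getD i 0)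
      (PySem.List.pyRepeat [a.2.2] N) hN1 hanslen hnd hrange j (by rw [hanslen]; exact hj)
    have hgetD : ∀ (xs : List Int) (h : j < xs.length), xs[j] = xs.getD j 0 := by
      intro xs h; simp [List.getD_eq_getElem?_getD, List.getElem?_eq_getElem h]
    rw [hgetD _ hjl, hgetD _ hjr, hmain]
    have hbase : (PySem.List.pyRepeat [a.2.2] N).getD j 0 = a.2.2 := by
      rw [PySem.List.pyRepeat_singleton]
      simp [List.getD_eq_getElem?_getD, hj]
    rw [hbase, htm]
    have hmap : (b.1.map (fun c => max c b.2.2)).getD j 0 = max (b.1.getD j 0) b.2.2 := by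
      have hjb : j < b.1.length := by rw [hlen]; exact hj
      simp [List.getD_eq_getElem?_getD, hjb]
    rw [hmap, hlu, hpt j hj]
    -- absent keys contribute 0 on A's side; cells are nonnegative on B's side
    have hz : ∀ k : Int, k ∉ a.1.keys → a.1.getD k 0 = 0 := by
      intro k hk
      rw [PySem.Dict.getD_eq_get?_getD, (PySem.Dict.get?_eq_none_iff_not_mem_keys _ _).2 hk]
      rfl
    have hnn1 := pvDictGetD_nonneg a.1 hval ((j : Int) + 1)
    have hnn2 := pvDictGetD_nonneg a.1 hval ((j : Int) + 1 - N)
    beta_reduce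
    by_cases h1 : ((j : Int) + 1) ∈ a.1.keys
    · by_cases h2 : ((j : Int) + 1 - N) ∈ a.1.keys
      · rw [if_pos h1, if_pos h2]; omega
      · rw [if_pos h1, if_neg h2, hz _ h2]; omega
    · by_cases h2 : ((j : Int) + 1 - N) ∈ a.1.keys
      · rw [if_neg h1, if_pos h2, hz _ h1]; omega
      · rw [if_neg h1, if_neg h2, hz _ h1, hz _ h2]; omega
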